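-- pv_equiv track=rewrite | github.com/hyagocandido4-netizen/Thalor | scripts/patches/p31b_fix_ps_helpers_and_orphans_apply.py | _find_marker_block
-- ===== SOURCE A (Python) =====
-- from typing import Optional, Tuple
--
-- MARK_START = "# [P15e_fix]"
--
-- MARK_END = "# [/P15e_fix]"
--
-- def _find_marker_block(lines: list[str]) -> Tuple[Optional[int], Optional[int]]:
--     start = None
--     end = None
--     for i, line in enumerate(lines):
--         if start is None and MARK_START in line:
--             start = i
--         if MARK_END in line:
--             end = i
--             # if multiple blocks exist, we still replace the first; later blocks will be removed
--             if start is not None: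
--                 break
--     if start is None or end is None or end < start:
--         return None, None
--     return start, end
-- ===== SOURCE B (Python) =====
-- from typing import Optional, Tuple
--
-- MARK_START = "# [P15e_fix]"
--
-- MARK_END = "# [/P15e_fix]"
--
-- def _find_marker_block(lines: list[str]) -> Tuple[Optional[int], Optional[int]]:
--     start = next((i for i, line in enumerate(lines) if MARK_START in line), None)
--     if start is None:
--         return None, None
--     end = next((i for i, line in enumerate(lines[start:], start) if MARK_END in line), None)
--     if end is None:
--         return None, None
--     return start, end
-- ===== Notes on version B (the rewrite author's own statement) =====
-- stated objective: simpler
-- what changed: Replaces A's single interleaved stateful loop (two Option state variables, a break, and a post-loop end<start guard) by two sequential scoped searches: first index containing MARK_START, then first index at or after it containing MARK_END in the suffix; no state variables or final guard needed.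
import Mathlib
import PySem

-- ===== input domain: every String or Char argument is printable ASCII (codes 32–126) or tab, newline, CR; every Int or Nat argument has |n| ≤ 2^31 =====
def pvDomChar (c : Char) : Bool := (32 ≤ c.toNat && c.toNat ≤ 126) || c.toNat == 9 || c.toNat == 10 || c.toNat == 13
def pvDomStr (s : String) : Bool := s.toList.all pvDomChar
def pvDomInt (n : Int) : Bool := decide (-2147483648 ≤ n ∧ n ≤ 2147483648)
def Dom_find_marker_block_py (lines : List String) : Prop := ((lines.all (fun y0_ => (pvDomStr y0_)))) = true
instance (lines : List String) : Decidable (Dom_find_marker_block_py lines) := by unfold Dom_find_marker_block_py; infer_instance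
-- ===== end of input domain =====

-- B replaces A's interleaved stateful scan (break + end<start guard) by two sequential scoped searches; same cost, no speed claim.


def pvMarkStart : String := "# [P15e_fix]"
def pvMarkEnd : String := "# [/P15e_fix]"

-- ===== PORT A =====
-- the check after the loop (reached by falling through or by 'break')
def pvFinishA (start end_ : Option Int) : Option Int × Option Int :=
  match start, end_ with
  | some s, some e => if e < s then (none, none) else (some s, some e)
  | _, _ => (none, none)

-- A's loop: i is the enumerate index, start/end_ the two state variables; 'break' returns via pvFinishA
def pvLoopA (i : Int) (start end_ : Option Int) : List String → Option Int × Option Int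
  | [] => pvFinishA start end_
  | l :: rest =>
    let start' := if start = none ∧ PySem.Str.isIn pvMarkStart l then some i else start
    if PySem.Str.isIn pvMarkEnd l then
      if start'.isSome then pvFinishA start' (some i)
      else pvLoopA (i + 1) start' (some i) rest
    else pvLoopA (i + 1) start' end_ rest

def find_marker_block_py (lines : List String) : Option Int × Option Int :=
  pvLoopA 0 none none lines

-- ===== PORT B =====
-- next((i for i, line in enumerate(xs, i0) if needle in line), None)
def pvFirstIdx (needle : String) (i0 : Int) : List String → Option Int
  | [] => none
  | l :: rest => if PySem.Str.isIn needle l then some i0 else pvFirstIdx needle (i0 + 1) rest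

def find_marker_block_py_alt (lines : List String) : Option Int × Option Int :=
  match pvFirstIdx pvMarkStart 0 lines with
  | none => (none, none)
  | some s =>
    match pvFirstIdx pvMarkEnd s (PySem.List.slice lines (some s) none) with
    | none => (none, none)
    | some e => (some s, some e)

-- ===== PRECONDITION & SPEC =====
def Spec_find_marker_block_py (lines : List String) (out : Option Int × Option Int) : Prop := out = find_marker_block_py_alt lines
instance (lines : List String) (out : Option Int × Option Int) : Decidable (Spec_find_marker_block_py lines out) := by unfold Spec_find_marker_block_py; infer_instance

-- ===== CLAIM (what is proved, stated in full; the proofs are below) =====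
def Claim_equal_find_marker_block_py : Prop := ∀ (lines : List String), Dom_find_marker_block_py lines → Spec_find_marker_block_py lines (find_marker_block_py lines)

-- ===== LEMMAS AND PROOFS =====

theorem pvFirstIdx_ge (needle : String) (i0 s : Int) (xs : List String)
    (h : pvFirstIdx needle i0 xs = some s) : i0 ≤ s := by
  induction xs generalizing i0 with
  | nil => simp [pvFirstIdx] at h
  | cons l rest ih =>
    simp only [pvFirstIdx] at h
    split at h
    · simp at h; omega
    · have := ih (i0 + 1) h; omega

-- Phase 2 of A's loop (start already set to s, every stale end is < s, s < current index):
-- it returns (s, first MARK_END index from here) or (none, none).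
theorem pvLoopA_phase2 (rest : List String) (j s : Int) (e? : Option Int)
    (hj : s < j) (he : ∀ e, e? = some e → e < s) :
    pvLoopA j (some s) e? rest =
      (match pvFirstIdx pvMarkEnd j rest with
       | none => (none, none)
       | some k => (some s, some k)) := by
  induction rest generalizing j e? with
  | nil =>
    cases e? with
    | none => simp [pvLoopA, pvFinishA, pvFirstIdx]
    | some e =>
      have := he e rfl
      simp [pvLoopA, pvFinishA, pvFirstIdx, show e < s from this]
  | cons l rest ih =>
    simp only [pvLoopA, pvFirstIdx]
    split
    · simp [pvFinishA, show ¬ j < s by omega]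
    · exact ih (j + 1) e? (by omega) he

-- Phase 1 of A's loop (start not yet set; every stale end is < current index):
-- it computes B's two scoped searches, the second one over the suffix from the start index.
theorem pvLoopA_phase1 (xs : List String) (i : Int) (e? : Option Int)
    (he : ∀ e, e? = some e → e < i) :
    pvLoopA i none e? xs =
      (match pvFirstIdx pvMarkStart i xs with
       | none => (none, none)
       | some s =>
         match pvFirstIdx pvMarkEnd s (xs.drop (s - i).toNat) with
         | none => (none, none)
         | some k => (some s, some k)) := by
  induction xs generalizing i e? with
  | nil =>
    cases e? <;> simp [pvLoopA, pvFinishA, pvFirstIdx]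
  | cons l rest ih =>
    by_cases hS : PySem.Chars.isIn pvMarkStart.toList l.toList = true
    · by_cases hE : PySem.Chars.isIn pvMarkEnd.toList l.toList = true
      · -- start and end on the same line: A breaks with (i, i)
        simp [pvLoopA, pvFirstIdx, hS, hE, pvFinishA]
      · have h2 := pvLoopA_phase2 rest (i + 1) i e? (by omega) he
        simp [pvLoopA, pvFirstIdx, hS, hE, h2]
    · have hdrop : ∀ s : Int, i + 1 ≤ s →
          (l :: rest).drop (s - i).toNat = rest.drop (s - (i + 1)).toNat := by
        intro s hs
        have h1 : (s - i).toNat = (s - (i + 1)).toNat + 1 := by omega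
        simp [h1]
      by_cases hE : PySem.Chars.isIn pvMarkEnd.toList l.toList = true
      · rw [show pvLoopA i none e? (l :: rest) = pvLoopA (i + 1) none (some i) rest from by
            simp [pvLoopA, hS, hE]]
        rw [ih (i + 1) (some i) (by intro e h; cases h; omega)]
        rw [show pvFirstIdx pvMarkStart i (l :: rest) = pvFirstIdx pvMarkStart (i + 1) rest from by
            simp [pvFirstIdx, hS]]
        cases hfs : pvFirstIdx pvMarkStart (i + 1) rest with
        | none => simp
        | some s => simp [hdrop s (pvFirstIdx_ge _ _ _ _ hfs)]
      · rw [show pvLoopA i none e? (l :: rest) = pvLoopA (i + 1) none e? rest from by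
            simp [pvLoopA, hS, hE]]
        rw [ih (i + 1) e? (by intro e h; have := he e h; omega)]
        rw [show pvFirstIdx pvMarkStart i (l :: rest) = pvFirstIdx pvMarkStart (i + 1) rest from by
            simp [pvFirstIdx, hS]]
        cases hfs : pvFirstIdx pvMarkStart (i + 1) rest with
        | none => simp
        | some s => simp [hdrop s (pvFirstIdx_ge _ _ _ _ hfs)]

-- ===== VERDICT (by name: the statement is the Claim_ definition above) =====
theorem find_marker_block_py_spec : Claim_equal_find_marker_block_py := by
  intro lines _
  unfold Spec_find_marker_block_py find_marker_block_py find_marker_block_py_alt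
  rw [pvLoopA_phase1 lines 0 none (by intro e h; cases h)]
  cases hfs : pvFirstIdx pvMarkStart 0 lines with
  | none => simp
  | some s =>
    have hs : 0 ≤ s := pvFirstIdx_ge _ _ _ _ hfs
    simp [PySem.List.slice_from lines hs]
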